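-- pv_equiv track=rewrite | github.com/chrisluedtke/py-flashcards | pyflashcards/card_processing.py | str_to_cards
-- ===== SOURCE A (Python) =====
-- from collections import namedtuple
--
-- FlashCard = namedtuple('FlashCard', ['question', 'answer', 'tags'])
--
-- def str_to_cards(s):
--     cards = []
--     q, a, t = [False, False, False]
--     q_t, a_t, t_t = ['', '', '']
--
--     for line in s.split('\n'):
--         if line.startswith('---'):
--             continue
--         if line.lower().startswith('question'):
--             if q:
--                 cards.append(
--                     FlashCard(question=q_t.strip(), answer=a_t.strip(),
--                               tags=[x.strip() for x in t_t.split(',')])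
--                 )
--                 a, t = [False, False]
--                 q_t, a_t, t_t = ['', '', '']
--             else:
--                 q = True
--             continue
--         if line.lower().startswith('answer'):
--             a = True
--             continue
--         if line.lower().startswith('tags'):
--             t = True
--             continue
--         if q and not a:
--             q_t += '\n' + line
--             continue
--         if a and not t:
--             a_t += '\n' + line
--             continue
--         if t:
--             t_t += '\n' + line
--             continue
--
--     cards.append(
--         FlashCard(question=q_t.strip(), answer=a_t.strip(),
--                   tags=[x.strip() for x in t_t.split(',')])
--     )
--
--     return cards
-- ===== SOURCE B (Python) =====
-- from collections import namedtuple
--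
-- FlashCard = namedtuple('FlashCard', ['question', 'answer', 'tags'])
--
-- def _segments(lines):
--     # group non-'---' lines into per-card segments: a new segment starts at
--     # every 'question'-prefixed line after the first one
--     done, cur, seen_q = [], [], False
--     for l in lines:
--         if l.lower().startswith('question'):
--             if seen_q:
--                 done.append(cur)
--                 cur = [l]
--             else:
--                 seen_q = True
--                 cur.append(l)
--         else:
--             cur.append(l)
--     done.append(cur)
--     return done
--
-- def _card(seg):
--     q = a = t = False
--     q_t = a_t = t_t = ''
--     for line in seg:
--         low = line.lower()
--         if low.startswith('question'):
--             q = True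
--         elif low.startswith('answer'):
--             a = True
--         elif low.startswith('tags'):
--             t = True
--         elif q and not a:
--             q_t += '\n' + line
--         elif a and not t:
--             a_t += '\n' + line
--         elif t:
--             t_t += '\n' + line
--     return FlashCard(question=q_t.strip(), answer=a_t.strip(),
--                      tags=[x.strip() for x in t_t.split(',')])
--
-- def str_to_cards(s):
--     lines = [l for l in s.split('\n') if not l.startswith('---')]
--     return [_card(seg) for seg in _segments(lines)]
-- ===== Notes on version B (the rewrite author's own statement) =====
-- stated objective: alternative
-- what changed: A interleaves card flushing inside one accumulating loop over all lines; B first splits the filtered lines into per-card segments (a new segment at each 'question' marker after the first) and then maps an independent per-segment card builder over them.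
import Mathlib
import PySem

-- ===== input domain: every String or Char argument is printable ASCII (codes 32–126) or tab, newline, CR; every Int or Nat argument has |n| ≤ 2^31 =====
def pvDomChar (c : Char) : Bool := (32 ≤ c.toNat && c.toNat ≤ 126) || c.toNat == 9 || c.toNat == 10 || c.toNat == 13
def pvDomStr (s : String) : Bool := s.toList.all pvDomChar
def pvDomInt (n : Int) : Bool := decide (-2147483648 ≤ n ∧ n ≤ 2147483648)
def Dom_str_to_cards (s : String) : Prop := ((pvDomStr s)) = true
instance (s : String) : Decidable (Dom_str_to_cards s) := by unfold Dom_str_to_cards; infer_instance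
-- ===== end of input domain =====

-- B re-decomposes A's single accumulating loop into: split into per-card segments, then map a
-- per-segment card builder over them (objective: alternative decomposition; same asymptotic cost).

-- ===== PORT A =====
def pvCardA (qt at_ tt : String) : String × String × List String :=
  (PySem.Str.strip qt, PySem.Str.strip at_,
   ((PySem.Str.split? tt ",").getD []).map (fun x => PySem.Str.strip x))

def pvStepA :
    (List (String × String × List String) × Bool × Bool × Bool × String × String × String) → String →
    (List (String × String × List String) × Bool × Bool × Bool × String × String × String)
  | (cards, q, a, t, qt, at_, tt), line =>
    if PySem.Str.startswith line "---" then (cards, q, a, t, qt, at_, tt)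
    else if PySem.Str.startswith (PySem.Str.lower line) "question" then
      (if q then (cards ++ [pvCardA qt at_ tt], q, false, false, "", "", "")
       else (cards, true, a, t, qt, at_, tt))
    else if PySem.Str.startswith (PySem.Str.lower line) "answer" then (cards, q, true, t, qt, at_, tt)
    else if PySem.Str.startswith (PySem.Str.lower line) "tags" then (cards, q, a, true, qt, at_, tt)
    else if q && !a then (cards, q, a, t, qt ++ "\n" ++ line, at_, tt)
    else if a && !t then (cards, q, a, t, qt, at_ ++ "\n" ++ line, tt)
    else if t then (cards, q, a, t, qt, at_, tt ++ "\n" ++ line)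
    else (cards, q, a, t, qt, at_, tt)

def str_to_cards (s : String) : List (String × String × List String) :=
  match List.foldl pvStepA ([], false, false, false, "", "", "") ((PySem.Str.split? s "\n").getD []) with
  | (cards, _, _, _, qt, at_, tt) => cards ++ [pvCardA qt at_ tt]

-- ===== PORT B =====
def pvCardStepB :
    (Bool × Bool × Bool × String × String × String) → String →
    (Bool × Bool × Bool × String × String × String)
  | (q, a, t, qt, at_, tt), line =>
    if PySem.Str.startswith (PySem.Str.lower line) "question" then (true, a, t, qt, at_, tt)
    else if PySem.Str.startswith (PySem.Str.lower line) "answer" then (q, true, t, qt, at_, tt)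
    else if PySem.Str.startswith (PySem.Str.lower line) "tags" then (q, a, true, qt, at_, tt)
    else if q && !a then (q, a, t, qt ++ "\n" ++ line, at_, tt)
    else if a && !t then (q, a, t, qt, at_ ++ "\n" ++ line, tt)
    else if t then (q, a, t, qt, at_, tt ++ "\n" ++ line)
    else (q, a, t, qt, at_, tt)

def pvCardB (seg : List String) : String × String × List String :=
  match List.foldl pvCardStepB (false, false, false, "", "", "") seg with
  | (_, _, _, qt, at_, tt) =>
    (PySem.Str.strip qt, PySem.Str.strip at_,
     ((PySem.Str.split? tt ",").getD []).map (fun x => PySem.Str.strip x))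

def pvSegStepB :
    (List (List String) × List String × Bool) → String →
    (List (List String) × List String × Bool)
  | (done, cur, seenq), l =>
    if PySem.Str.startswith (PySem.Str.lower l) "question" then
      (if seenq then (done ++ [cur], [l], true) else (done, cur ++ [l], true))
    else (done, cur ++ [l], seenq)

def pvSegmentsB (lines : List String) : List (List String) :=
  match List.foldl pvSegStepB ([], [], false) lines with
  | (done, cur, _) => done ++ [cur]

def str_to_cards_alt (s : String) : List (String × String × List String) :=
  (pvSegmentsB (((PySem.Str.split? s "\n").getD []).filter
      (fun l => !PySem.Str.startswith l "---"))).map pvCardB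

-- ===== PRECONDITION & SPEC =====
def Spec_str_to_cards (s : String) (out : List (String × String × List String)) : Prop := out = str_to_cards_alt s
instance (s : String) (out : List (String × String × List String)) : Decidable (Spec_str_to_cards s out) := by unfold Spec_str_to_cards; infer_instance

-- ===== CLAIM (what is proved, stated in full; the proofs are below) =====
def Claim_equal_str_to_cards : Prop := ∀ (s : String), Dom_str_to_cards s → Spec_str_to_cards s (str_to_cards s)

-- ===== LEMMAS AND PROOFS =====

-- B's card-machine state over a segment
def pvMach (seg : List String) : Bool × Bool × Bool × String × String × String :=
  List.foldl pvCardStepB (false, false, false, "", "", "") seg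

-- final flush of A's state
def pvFinA :
    (List (String × String × List String) × Bool × Bool × Bool × String × String × String) →
    List (String × String × List String)
  | (cards, _, _, _, qt, at_, tt) => cards ++ [pvCardA qt at_ tt]

-- B's finish: map the card builder over accumulated segments plus the open one
def pvFinB :
    (List (List String) × List String × Bool) → List (String × String × List String)
  | (done, cur, _) => done.map pvCardB ++ [pvCardB cur]

lemma pvStepA_dash (st) (l : String) (h : PySem.Str.startswith l "---" = true) :
    pvStepA st l = st := by
  obtain ⟨cards, q, a, t, qt, at_, tt⟩ := st
  simp only [pvStepA]
  rw [if_pos h]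

lemma pvFoldA_filter (lines : List String) (st) :
    List.foldl pvStepA st lines
      = List.foldl pvStepA st (lines.filter (fun l => !PySem.Str.startswith l "---")) := by
  induction lines generalizing st with
  | nil => rfl
  | cons l ls ih =>
    by_cases h : PySem.Str.startswith l "---" = true
    · have hc : PySem.Chars.startswith l.toList ['-', '-', '-'] = true := by simpa using h
      rw [List.foldl_cons, pvStepA_dash st l h]
      rw [show (l :: ls).filter (fun l => !PySem.Str.startswith l "---")
            = ls.filter (fun l => !PySem.Str.startswith l "---") by simp [List.filter, hc]]
      exact ih st
    · have hc : PySem.Chars.startswith l.toList ['-', '-', '-'] = false := by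
        simpa using Bool.eq_false_iff.mpr h
      rw [List.foldl_cons]
      rw [show (l :: ls).filter (fun l => !PySem.Str.startswith l "---")
            = l :: ls.filter (fun l => !PySem.Str.startswith l "---") by
          simp [List.filter, hc]]
      rw [List.foldl_cons]
      exact ih _

lemma pvCardB_eq (seg : List String) (q a t : Bool) (qt at_ tt : String)
    (hm : pvMach seg = (q, a, t, qt, at_, tt)) :
    pvCardB seg = pvCardA qt at_ tt := by
  unfold pvCardB
  rw [show List.foldl pvCardStepB (false, false, false, "", "", "") seg = pvMach seg from rfl, hm]
  rfl

lemma pvMach_append (seg : List String) (l : String) :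
    pvMach (seg ++ [l]) = pvCardStepB (pvMach seg) l := by
  simp [pvMach]

lemma pvStepA_nondash (cards) (q a t : Bool) (qt at_ tt : String) (l : String)
    (hd : PySem.Str.startswith l "---" = false) :
    pvStepA (cards, q, a, t, qt, at_, tt) l
      = (if PySem.Str.startswith (PySem.Str.lower l) "question" = true then
           (if q then (cards ++ [pvCardA qt at_ tt], q, false, false, "", "", "")
            else (cards, true, a, t, qt, at_, tt))
         else (cards, pvCardStepB (q, a, t, qt, at_, tt) l)) := by
  simp only [pvStepA, pvCardStepB]
  rw [if_neg (by rw [hd]; simp)]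
  by_cases hq : PySem.Str.startswith (PySem.Str.lower l) "question" = true
  · rw [if_pos hq, if_pos hq]
  · rw [if_neg hq, if_neg hq]
    split_ifs <;> rfl

lemma pvCardStepB_q (q a t : Bool) (qt at_ tt : String) (l : String)
    (hq : ¬ PySem.Str.startswith (PySem.Str.lower l) "question" = true) :
    (pvCardStepB (q, a, t, qt, at_, tt) l).1 = q := by
  simp only [pvCardStepB]
  rw [if_neg hq]
  split_ifs <;> rfl

lemma pvSegStepB_eq (done : List (List String)) (cur : List String) (seenq : Bool) (l : String) :
    pvSegStepB (done, cur, seenq) l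
      = (if PySem.Str.startswith (PySem.Str.lower l) "question" = true then
           (if seenq then (done ++ [cur], [l], true) else (done, cur ++ [l], true))
         else (done, cur ++ [l], seenq)) := rfl

lemma pvMain : ∀ (lines : List String) (dB : List (List String)) (cur : List String)
    (q a t : Bool) (qt at_ tt : String),
    (∀ l ∈ lines, PySem.Str.startswith l "---" = false) →
    pvMach cur = (q, a, t, qt, at_, tt) →
    pvFinA (List.foldl pvStepA (dB.map pvCardB, q, a, t, qt, at_, tt) lines)
      = pvFinB (List.foldl pvSegStepB (dB, cur, q) lines) := by
  intro lines
  induction lines with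
  | nil =>
    intro dB cur q a t qt at_ tt _ hm
    simp [pvFinA, pvFinB, pvCardB_eq cur q a t qt at_ tt hm]
  | cons l ls ih =>
    intro dB cur q a t qt at_ tt h hm
    have hd : PySem.Str.startswith l "---" = false := h l List.mem_cons_self
    have h' : ∀ x ∈ ls, PySem.Str.startswith x "---" = false :=
      fun x hx => h x (List.mem_cons_of_mem l hx)
    simp only [List.foldl_cons, pvStepA_nondash _ _ _ _ _ _ _ _ hd, pvSegStepB_eq]
    by_cases hq : PySem.Str.startswith (PySem.Str.lower l) "question" = true
    · rw [if_pos hq, if_pos hq]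
      cases q with
      | true =>
        rw [if_pos rfl, if_pos rfl]
        rw [show (dB.map pvCardB) ++ [pvCardA qt at_ tt] = (dB ++ [cur]).map pvCardB by
          simp [pvCardB_eq cur true a t qt at_ tt hm]]
        exact ih (dB ++ [cur]) [l] true false false "" "" "" h'
          (by simp only [pvMach, List.foldl_cons, List.foldl_nil, pvCardStepB]; rw [if_pos hq])
      | false =>
        rw [if_neg (by simp), if_neg (by simp)]
        exact ih dB (cur ++ [l]) true a t qt at_ tt h'
          (by rw [pvMach_append, hm]; simp only [pvCardStepB]; rw [if_pos hq])
    · rw [if_neg hq, if_neg hq]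
      have hq1 := pvCardStepB_q q a t qt at_ tt l hq
      rcases hs : pvCardStepB (q, a, t, qt, at_, tt) l with ⟨q2, a2, t2, qt2, at2, tt2⟩
      rw [hs] at hq1
      simp only at hq1
      rw [← hq1]
      exact ih dB (cur ++ [l]) q2 a2 t2 qt2 at2 tt2 h'
        (by rw [pvMach_append, hm, hs])

lemma pvAlt_eq (lines : List String) :
    (pvSegmentsB lines).map pvCardB = pvFinB (List.foldl pvSegStepB ([], [], false) lines) := by
  unfold pvSegmentsB pvFinB
  rcases List.foldl pvSegStepB ([], [], false) lines with ⟨done, cur, b⟩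
  simp

-- ===== VERDICT (by name: the statement is the Claim_ definition above) =====
theorem str_to_cards_spec : Claim_equal_str_to_cards := by
  intro s _
  unfold Spec_str_to_cards str_to_cards str_to_cards_alt
  rw [pvAlt_eq]
  have hfilt : ∀ l ∈ ((PySem.Str.split? s "\n").getD []).filter
      (fun l => !PySem.Str.startswith l "---"), PySem.Str.startswith l "---" = false := by
    intro l hl
    have := List.of_mem_filter hl
    simpa using this
  have key := pvMain _ [] [] false false false "" "" "" hfilt rfl
  simp only [List.map_nil] at key
  rw [← pvFoldA_filter] at key
  rw [← key]
  rcases List.foldl pvStepA ([], false, false, false, "", "", "")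
    ((PySem.Str.split? s "\n").getD []) with ⟨c, q, a, t, x, y, z⟩
  rfl
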